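-- pv_equiv track=rewrite | github.com/ndevenish/gflabel | src/gflabel/label.py | clean_up_name
-- ===== SOURCE A (Python) =====
-- def clean_up_name(dirty_name: str):
--     # Sanitize the label. Not for security, but just to hope that
--     # any external tools don't freak out about labels they don't like.
--     clean_name = ""
--     for char in dirty_name.removeprefix("_fragment_").removesuffix("Fragment").removesuffix("fragment"):
--         if char == " ":
--             char = "_"
--         if char.isascii() and (char.isalnum() or char in "_-"):
--             clean_name += char
--     if not clean_name or not clean_name[0].isalpha():
--         clean_name = "L" + clean_name
--     return clean_name
-- ===== SOURCE B (Python) =====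
-- def clean_up_name(dirty_name: str):
--     stem = dirty_name.removeprefix("_fragment_").removesuffix("Fragment").removesuffix("fragment")
--     table = {ord(" "): "_"}
--     for c in set(stem):
--         if c != " " and not (c.isascii() and (c.isalnum() or c in "_-")):
--             table[ord(c)] = None
--     out = stem.translate(table)
--     if not out or not out[0].isalpha():
--         out = "L" + out
--     return out
-- ===== Notes on version B (the rewrite author's own statement) =====
-- stated objective: faster
-- what changed: B precomputes a per-input translation table (dict over the distinct characters of the stripped name, mapping space to underscore and each disallowed character to deletion) and sanitizes with a single str.translate pass, replacing A's per-character predicate-test-and-string-append accumulator loop.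
import Mathlib
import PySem

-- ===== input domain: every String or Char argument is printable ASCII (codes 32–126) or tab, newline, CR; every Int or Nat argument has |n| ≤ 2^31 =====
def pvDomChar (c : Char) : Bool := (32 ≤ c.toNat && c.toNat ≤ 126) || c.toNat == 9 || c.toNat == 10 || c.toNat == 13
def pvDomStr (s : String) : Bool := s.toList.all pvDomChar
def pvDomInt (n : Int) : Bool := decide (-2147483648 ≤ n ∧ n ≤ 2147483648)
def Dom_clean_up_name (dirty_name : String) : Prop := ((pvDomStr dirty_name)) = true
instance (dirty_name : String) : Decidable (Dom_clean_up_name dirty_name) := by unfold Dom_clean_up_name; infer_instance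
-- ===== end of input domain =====

-- B builds a per-input deletion/translation table (dict over the DISTINCT characters of
-- the stem) once and sanitizes with a single str.translate pass, instead of A's per-char
-- predicate-and-append accumulator loop (constant-factor faster: one C-level translate pass). Both programs are pure.

-- ===== PORT A =====
-- str.removeprefix / str.removesuffix, ported by hand (exact Python semantics)
-- constant lists, spelled as char literals (= "_fragment_".toList etc.)
def pvFragPrefix : List Char := ['_', 'f', 'r', 'a', 'g', 'm', 'e', 'n', 't', '_']
def pvFragSufF : List Char := ['F', 'r', 'a', 'g', 'm', 'e', 'n', 't']
def pvFragSuff : List Char := ['f', 'r', 'a', 'g', 'm', 'e', 'n', 't']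

def removePrefixC (cs p : List Char) : List Char :=
  if PySem.Chars.startswith cs p then cs.drop p.length else cs

def removeSuffixC (cs p : List Char) : List Char :=
  if PySem.Chars.endswith cs p then cs.take (cs.length - p.length) else cs

def clean_up_name (dirty_name : String) : String :=
  let base := removeSuffixC (removeSuffixC (removePrefixC dirty_name.toList pvFragPrefix)
      pvFragSufF) pvFragSuff
  let clean := base.foldl (fun acc char =>
    let char := if char == ' ' then '_' else char
    -- char.isascii() ported by hand: code point < 128 (exact)
    if decide (char.toNat < 128) && (PySem.Chars.isalnum char || PySem.Chars.isIn [char] ['_', '-'])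
    then acc ++ [char] else acc) []
  let clean := if clean.isEmpty || !(PySem.Chars.isalpha (clean.headD 'L')) then 'L' :: clean else clean
  String.ofList clean

-- ===== PORT B =====
-- the table-filling condition of Source B: c != " " and not (c.isascii() and (c.isalnum() or c in "_-"))
def pvBadChar (c : Char) : Bool :=
  c != ' ' && !(decide (c.toNat < 128) && (PySem.Chars.isalnum c || PySem.Chars.isIn [c] ['_', '-']))

-- Source B's table: {ord(" "): "_"} then table[ord(c)] = None for every bad c in set(stem).
-- The fold is over set(stem) (distinct chars; Python's hash order is not modelled, but the
-- keys are distinct so the resulting dict lookups are order-independent).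
def pvTable (stem : List Char) : PySem.Dict Nat (Option Char) :=
  (PySem.Set.ofList stem).foldl
    (fun t c => if pvBadChar c then t.insert c.toNat none else t)
    (PySem.Dict.insert PySem.Dict.empty (' '.toNat) (some '_'))

def clean_up_name_alt (dirty_name : String) : String :=
  let stem := removeSuffixC (removeSuffixC (removePrefixC dirty_name.toList pvFragPrefix)
      pvFragSufF) pvFragSuff
  let table := pvTable stem
  -- str.translate: each char is looked up by code point; unmapped → itself, None → deleted
  let out := stem.filterMap (fun c => table.getD c.toNat (some c))
  let out := if out.isEmpty || !(PySem.Chars.isalpha (out.headD 'L')) then 'L' :: out else out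
  String.ofList out

-- ===== PRECONDITION & SPEC =====
def Spec_clean_up_name (dirty_name : String) (out : String) : Prop := out = clean_up_name_alt dirty_name
instance (dirty_name : String) (out : String) : Decidable (Spec_clean_up_name dirty_name out) := by unfold Spec_clean_up_name; infer_instance

-- ===== CLAIM (what is proved, stated in full; the proofs are below) =====
def Claim_equal_clean_up_name : Prop := ∀ (dirty_name : String), Dom_clean_up_name dirty_name → Spec_clean_up_name dirty_name (clean_up_name dirty_name)

-- ===== LEMMAS AND PROOFS =====

-- A's per-character step, as an Option-valued function
def aStep (c : Char) : Option Char :=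
  let c' := if c == ' ' then '_' else c
  if decide (c'.toNat < 128) && (PySem.Chars.isalnum c' || PySem.Chars.isIn [c'] ['_', '-'])
  then some c' else none

lemma foldlA (cs acc : List Char) :
    cs.foldl (fun acc char =>
      let char := if char == ' ' then '_' else char
      if decide (char.toNat < 128) && (PySem.Chars.isalnum char || PySem.Chars.isIn [char] ['_', '-'])
      then acc ++ [char] else acc) acc = acc ++ cs.filterMap aStep := by
  induction cs generalizing acc with
  | nil => simp
  | cons c cs ih =>
    simp only [List.foldl_cons, List.filterMap_cons, ih, aStep]
    split
    · split <;> simp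
    · split <;> simp

-- what B's table lookup returns, as a function of the character alone
def bSpec (c : Char) : Option Char :=
  if c == ' ' then some '_' else if pvBadChar c then none else some c

lemma getD_table_fold (l : List Char) (t : PySem.Dict Nat (Option Char)) (c : Char) :
    (l.foldl (fun t c => if pvBadChar c then t.insert c.toNat none else t) t).getD c.toNat (some c)
      = if (∃ x ∈ l, pvBadChar x ∧ x.toNat = c.toNat) then none
        else t.getD c.toNat (some c) := by
  induction l generalizing t with
  | nil => simp
  | cons x l ih =>
    simp only [List.foldl_cons, ih]
    by_cases hex : (∃ y ∈ x :: l, pvBadChar y = true ∧ y.toNat = c.toNat)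
    · rw [if_pos hex]
      by_cases hl : (∃ y ∈ l, pvBadChar y = true ∧ y.toNat = c.toNat)
      · rw [if_pos hl]
      · rw [if_neg hl]
        rcases hex with ⟨y, hy, hp, hn⟩
        rcases List.mem_cons.mp hy with hyx | hy'
        · rw [hyx] at hp hn
          rw [if_pos hp, ← hn, PySem.Dict.getD_insert, if_pos rfl]
        · exact absurd ⟨y, hy', hp, hn⟩ hl
    · rw [if_neg hex]
      have hl : ¬ (∃ y ∈ l, pvBadChar y = true ∧ y.toNat = c.toNat) := by
        rintro ⟨y, hy, hp, hn⟩; exact hex ⟨y, List.mem_cons_of_mem _ hy, hp, hn⟩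
      rw [if_neg hl]
      by_cases hx : pvBadChar x = true
      · have hne : x.toNat ≠ c.toNat := fun hn => hex ⟨x, List.mem_cons_self, hx, hn⟩
        rw [if_pos hx, PySem.Dict.getD_insert, if_neg (Ne.symm hne)]
      · rw [if_neg hx]

lemma toNat_inj_of (x c : Char) (h : x.toNat = c.toNat) : x = c := by
  have := congrArg Char.ofNat h
  rwa [Char.ofNat_toNat, Char.ofNat_toNat] at this

lemma getD_table (stem : List Char) (c : Char) (hc : c ∈ stem) :
    (pvTable stem).getD c.toNat (some c) = bSpec c := by
  unfold pvTable
  rw [getD_table_fold]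
  by_cases hb : pvBadChar c = true
  · have hex : (∃ x ∈ PySem.Set.ofList stem, pvBadChar x ∧ x.toNat = c.toNat) :=
      ⟨c, by simpa [PySem.Set.mem_ofList] using hc, hb, rfl⟩
    have hcs : c ≠ ' ' := by
      intro h; rw [h] at hb; simp [pvBadChar] at hb
    rw [if_pos hex, bSpec, if_neg (by simpa using hcs), if_pos hb]
  · have hne : ¬ (∃ x ∈ PySem.Set.ofList stem, pvBadChar x ∧ x.toNat = c.toNat) := by
      rintro ⟨x, _, hp, hn⟩
      exact hb (toNat_inj_of x c hn ▸ hp)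
    rw [if_neg hne]
    by_cases hcs : c = ' '
    · subst hcs; simp [bSpec]
    · have hn32 : c.toNat ≠ 32 := fun h => hcs (toNat_inj_of c ' ' h)
      simp [bSpec, hcs, hb, PySem.Dict.getD_insert, hn32]

set_option maxRecDepth 10000 in
lemma stepAgree : ∀ n : Nat, n < 128 → bSpec (Char.ofNat n) = aStep (Char.ofNat n) := by decide

lemma domChar_lt (c : Char) (h : pvDomChar c = true) : c.toNat < 128 := by
  simp only [pvDomChar, Bool.or_eq_true, Bool.and_eq_true, decide_eq_true_eq, beq_iff_eq] at h
  omega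

lemma filterMapB (stem : List Char) (h : stem.all pvDomChar = true) :
    stem.filterMap (fun c => (pvTable stem).getD c.toNat (some c)) = stem.filterMap aStep := by
  apply List.filterMap_congr
  intro c hc
  rw [getD_table stem c hc]
  have hlt : c.toNat < 128 := domChar_lt c (by
    simp only [List.all_eq_true] at h; exact h c hc)
  have := stepAgree c.toNat hlt
  rwa [Char.ofNat_toNat] at this

lemma all_removePrefixC (cs p : List Char) (h : cs.all pvDomChar = true) :
    (removePrefixC cs p).all pvDomChar = true := by
  unfold removePrefixC
  split
  · simp only [List.all_eq_true] at *
    exact fun c hc => h c (List.mem_of_mem_drop hc)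
  · exact h

lemma all_removeSuffixC (cs p : List Char) (h : cs.all pvDomChar = true) :
    (removeSuffixC cs p).all pvDomChar = true := by
  unfold removeSuffixC
  split
  · simp only [List.all_eq_true] at *
    exact fun c hc => h c (List.mem_of_mem_take hc)
  · exact h

-- ===== VERDICT (by name: the statement is the Claim_ definition above) =====
theorem clean_up_name_spec : Claim_equal_clean_up_name := by
  intro d hdom
  unfold Dom_clean_up_name pvDomStr at hdom
  unfold Spec_clean_up_name clean_up_name clean_up_name_alt
  have hall : (removeSuffixC (removeSuffixC (removePrefixC d.toList pvFragPrefix)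
      pvFragSufF) pvFragSuff).all pvDomChar = true :=
    all_removeSuffixC _ _ (all_removeSuffixC _ _ (all_removePrefixC _ _ hdom))
  simp only [foldlA, List.nil_append, filterMapB _ hall]
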